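-- pv_equiv track=rewrite | github.com/yuriak/MS-ASR | src/evaluation/evaluate.py | reannotate_sentences
-- ===== SOURCE A (Python) =====
-- def reannotate_sentences(A, B):
--     tokens_B = [word for line in B for word in line.split()]
--
--     annotated_A = []
--     for a_sentence in A:
--         tokens_A = a_sentence.split()
--         result = []
--         for token in tokens_A:
--             if tokens_B:
--                 b_token = tokens_B.pop(0)
--                 if b_token.startswith("[") or b_token.endswith("]"):
--                     result.append(b_token)
--                 else:
--                     result.append(token)
--             else:
--                 result.append(token)
--
--         annotated_A.append(" ".join(result))
--     return annotated_A
-- ===== SOURCE B (Python) =====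
-- def reannotate_sentences(A, B):
--     flat_a = [w for s in A for w in s.split()]
--     lens = [len(s.split()) for s in A]
--     tokens_b = [w for line in B for w in line.split()]
--     merged = [b if (b.startswith("[") or b.endswith("]")) else a
--               for a, b in zip(flat_a, tokens_b)]
--     merged += flat_a[len(merged):]
--     out = []
--     i = 0
--     for n in lens:
--         out.append(" ".join(merged[i:i + n]))
--         i += n
--     return out
-- ===== Notes on version B (the rewrite author's own statement) =====
-- stated objective: alternative
-- what changed: Replaces A's stateful queue (pop(0) from a shared tokens_B list threaded through nested loops, linear per pop) by a flat zip-merge of all A tokens with all B tokens followed by regrouping the merged flat list into sentences via recorded per-sentence token counts.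
import Mathlib
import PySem

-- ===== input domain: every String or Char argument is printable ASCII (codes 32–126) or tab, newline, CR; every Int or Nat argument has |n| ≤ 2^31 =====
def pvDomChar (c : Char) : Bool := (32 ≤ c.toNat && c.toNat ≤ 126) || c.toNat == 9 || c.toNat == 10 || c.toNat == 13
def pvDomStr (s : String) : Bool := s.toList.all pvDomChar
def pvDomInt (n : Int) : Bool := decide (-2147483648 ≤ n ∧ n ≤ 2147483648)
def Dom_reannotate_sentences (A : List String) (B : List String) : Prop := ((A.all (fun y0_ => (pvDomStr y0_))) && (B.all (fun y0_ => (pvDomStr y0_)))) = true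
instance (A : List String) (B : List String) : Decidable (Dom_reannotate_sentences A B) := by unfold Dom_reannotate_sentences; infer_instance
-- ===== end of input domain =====

-- B replaces A's shared pop(0) queue threaded through nested loops by a flat zip-merge of
-- all tokens followed by regrouping with per-sentence token counts (alternative decomposition).

-- ===== PORT A =====
def reannotate_sentences (A : List String) (B : List String) : List String :=
  let tokens_B := B.flatMap (fun line => PySem.Str.split₀ line)
  (A.foldl (fun (st : List String × List String) a_sentence =>
    let tokens_A := PySem.Str.split₀ a_sentence
    let inner := tokens_A.foldl (fun (st2 : List String × List String) token =>
      match st2.1 with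
      | b_token :: rest =>
        if PySem.Str.startswith b_token "[" || PySem.Str.endswith b_token "]" then
          (rest, st2.2 ++ [b_token])
        else
          (rest, st2.2 ++ [token])
      | [] => ([], st2.2 ++ [token])) (st.1, [])
    (inner.1, st.2 ++ [PySem.Str.join " " inner.2])) (tokens_B, [])).2

-- ===== PORT B =====
def reannotate_sentences_alt (A : List String) (B : List String) : List String :=
  let flat_a := A.flatMap (fun s => PySem.Str.split₀ s)
  let lens := A.map (fun s => ((PySem.Str.split₀ s).length : Int))
  let tokens_b := B.flatMap (fun line => PySem.Str.split₀ line)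
  let merged := (flat_a.zip tokens_b).map (fun ab =>
    if PySem.Str.startswith ab.2 "[" || PySem.Str.endswith ab.2 "]" then ab.2 else ab.1)
  let merged2 := merged ++ flat_a.drop merged.length
  (lens.foldl (fun (st : List String × Int) n =>
    (st.1 ++ [PySem.Str.join " " (PySem.List.slice merged2 (some st.2) (some (st.2 + n)))],
     st.2 + n)) ([], 0)).1

-- ===== PRECONDITION & SPEC =====
def Spec_reannotate_sentences (A : List String) (B : List String) (out : List String) : Prop := out = reannotate_sentences_alt A B
instance (A : List String) (B : List String) (out : List String) : Decidable (Spec_reannotate_sentences A B out) := by unfold Spec_reannotate_sentences; infer_instance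

-- ===== CLAIM (what is proved, stated in full; the proofs are below) =====
def Claim_equal_reannotate_sentences : Prop := ∀ (A : List String) (B : List String), Dom_reannotate_sentences A B → Spec_reannotate_sentences A B (reannotate_sentences A B)

-- ===== LEMMAS AND PROOFS =====

/-- The common token-merge: pair A-tokens with B-tokens, keep the B-token when bracketed,
A-tokens past B's end stay. -/
def mergeTok : List String → List String → List String
  | [], _ => []
  | a :: as, [] => a :: mergeTok as []
  | a :: as, b :: bs =>
      (if PySem.Str.startswith b "[" || PySem.Str.endswith b "]" then b else a) :: mergeTok as bs

lemma mergeTok_nil (as : List String) : mergeTok as [] = as := by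
  induction as with
  | nil => rfl
  | cons a as ih => simp [mergeTok, ih]

lemma mergeTok_length (as bs : List String) : (mergeTok as bs).length = as.length := by
  induction as generalizing bs with
  | nil => rfl
  | cons a as ih => cases bs <;> simp [mergeTok, ih]

lemma mergeTok_append (xs ys bs : List String) :
    mergeTok (xs ++ ys) bs = mergeTok xs bs ++ mergeTok ys (bs.drop xs.length) := by
  induction xs generalizing bs with
  | nil => simp [mergeTok]
  | cons x xs ih =>
    cases bs with
    | nil => simp [mergeTok, mergeTok_nil]
    | cons b bs => simp [mergeTok, ih]

lemma mergeTok_zip (as bs : List String) :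
    (as.zip bs).map (fun ab =>
        if PySem.Str.startswith ab.2 "[" || PySem.Str.endswith ab.2 "]" then ab.2 else ab.1)
      ++ as.drop ((as.zip bs).map (fun ab =>
        if PySem.Str.startswith ab.2 "[" || PySem.Str.endswith ab.2 "]" then ab.2 else ab.1)).length
    = mergeTok as bs := by
  induction as generalizing bs with
  | nil => simp [mergeTok]
  | cons a as ih =>
    cases bs with
    | nil => simp [mergeTok, mergeTok_nil]
    | cons b bs => simpa [mergeTok] using ih bs

/-- What A computes: join each sentence's merged tokens, consuming B's tokens left to right. -/
def regroup : List String → List String → List String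
  | [], _ => []
  | s :: rest, bs =>
      PySem.Str.join " " (mergeTok (PySem.Str.split₀ s) bs)
        :: regroup rest (bs.drop (PySem.Str.split₀ s).length)

lemma innerA_eq (ts : List String) : ∀ (bs acc : List String),
    ts.foldl (fun (st2 : List String × List String) token =>
      match st2.1 with
      | b_token :: rest =>
        if PySem.Str.startswith b_token "[" || PySem.Str.endswith b_token "]" then
          (rest, st2.2 ++ [b_token])
        else
          (rest, st2.2 ++ [token])
      | [] => ([], st2.2 ++ [token])) (bs, acc)
    = (bs.drop ts.length, acc ++ mergeTok ts bs) := by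
  induction ts with
  | nil => intro bs acc; simp [mergeTok]
  | cons t ts ih =>
    intro bs acc
    cases bs with
    | nil =>
      rw [List.foldl_cons]
      rw [show (match (([] : List String), acc).1 with
        | b_token :: rest =>
          if PySem.Str.startswith b_token "[" || PySem.Str.endswith b_token "]" then
            (rest, (([] : List String), acc).2 ++ [b_token])
          else
            (rest, (([] : List String), acc).2 ++ [t])
        | [] => (([] : List String), (([] : List String), acc).2 ++ [t]))
        = (([] : List String), acc ++ [t]) from rfl]
      rw [ih [] (acc ++ [t])]
      simp [mergeTok, mergeTok_nil]
    | cons b bs =>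
      rw [List.foldl_cons]
      rw [show (match (b :: bs, acc).1 with
        | b_token :: rest =>
          if PySem.Str.startswith b_token "[" || PySem.Str.endswith b_token "]" then
            (rest, (b :: bs, acc).2 ++ [b_token])
          else
            (rest, (b :: bs, acc).2 ++ [t])
        | [] => (([] : List String), (b :: bs, acc).2 ++ [t]))
        = (bs, acc ++ [if PySem.Str.startswith b "[" || PySem.Str.endswith b "]" then b else t])
        from by
          show (if PySem.Str.startswith b "[" || PySem.Str.endswith b "]" then
              (bs, acc ++ [b]) else (bs, acc ++ [t])) = _
          split <;> rfl]
      rw [ih bs _]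
      rw [show mergeTok (t :: ts) (b :: bs)
        = (if PySem.Str.startswith b "[" || PySem.Str.endswith b "]" then b else t)
            :: mergeTok ts bs from rfl]
      simp

lemma outer_simple (A : List String) : ∀ (bs acc : List String),
    (A.foldl (fun (st : List String × List String) s =>
      (st.1.drop (PySem.Str.split₀ s).length,
       st.2 ++ [PySem.Str.join " " (mergeTok (PySem.Str.split₀ s) st.1)])) (bs, acc)).2
    = acc ++ regroup A bs := by
  induction A with
  | nil => intro bs acc; simp [regroup]
  | cons s A ih => intro bs acc; simp [List.foldl_cons, ih, regroup]

lemma reannotate_eq_regroup (A B : List String) :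
    reannotate_sentences A B = regroup A (B.flatMap (fun line => PySem.Str.split₀ line)) := by
  unfold reannotate_sentences
  have hf : (fun (st : List String × List String) a_sentence =>
      let tokens_A := PySem.Str.split₀ a_sentence
      let inner := tokens_A.foldl (fun (st2 : List String × List String) token =>
        match st2.1 with
        | b_token :: rest =>
          if PySem.Str.startswith b_token "[" || PySem.Str.endswith b_token "]" then
            (rest, st2.2 ++ [b_token])
          else
            (rest, st2.2 ++ [token])
        | [] => ([], st2.2 ++ [token])) (st.1, [])
      (inner.1, st.2 ++ [PySem.Str.join " " inner.2]))
    = (fun (st : List String × List String) s =>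
      (st.1.drop (PySem.Str.split₀ s).length,
       st.2 ++ [PySem.Str.join " " (mergeTok (PySem.Str.split₀ s) st.1)])) := by
    funext st s
    simp only [innerA_eq, List.nil_append]
  rw [hf]
  exact outer_simple A _ []

lemma foldB_eq (A : List String) : ∀ (pre bs acc : List String) (m : List String),
    m = pre ++ mergeTok (A.flatMap (fun s => PySem.Str.split₀ s)) bs →
    ((A.map (fun s => ((PySem.Str.split₀ s).length : Int))).foldl
      (fun (st : List String × Int) n =>
        (st.1 ++ [PySem.Str.join " " (PySem.List.slice m (some st.2) (some (st.2 + n)))],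
         st.2 + n)) (acc, (pre.length : Int))).1
    = acc ++ regroup A bs := by
  induction A with
  | nil => intro pre bs acc m _; simp [regroup]
  | cons s A ih =>
    intro pre bs acc m hm
    have hsplit : m = pre ++ (mergeTok (PySem.Str.split₀ s) bs
        ++ mergeTok (A.flatMap (fun s => PySem.Str.split₀ s))
             (bs.drop (PySem.Str.split₀ s).length)) := by
      simpa [mergeTok_append] using hm
    have hslice : PySem.List.slice m (some ((pre.length : Nat) : Int))
        (some (((pre.length : Nat) : Int) + (((PySem.Str.split₀ s).length : Nat) : Int)))
        = mergeTok (PySem.Str.split₀ s) bs := by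
      rw [PySem.List.slice_natCast_add, hsplit, List.drop_left,
        ← mergeTok_length (PySem.Str.split₀ s) bs, List.take_left]
    simp only [List.map_cons, List.foldl_cons]
    rw [hslice]
    have hlen : ((pre.length : Nat) : Int) + (((PySem.Str.split₀ s).length : Nat) : Int)
        = (((pre ++ mergeTok (PySem.Str.split₀ s) bs).length : Nat) : Int) := by
      simp [mergeTok_length]
    rw [hlen, ih (pre ++ mergeTok (PySem.Str.split₀ s) bs)
        (bs.drop (PySem.Str.split₀ s).length) _ m (by rw [hsplit, List.append_assoc])]
    simp [regroup]

lemma reannotate_alt_eq_regroup (A B : List String) :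
    reannotate_sentences_alt A B = regroup A (B.flatMap (fun line => PySem.Str.split₀ line)) := by
  unfold reannotate_sentences_alt
  simp only [mergeTok_zip]
  exact foldB_eq A [] _ [] _ rfl

-- ===== VERDICT (by name: the statement is the Claim_ definition above) =====
theorem reannotate_sentences_spec : Claim_equal_reannotate_sentences := by
  intro A B _
  unfold Spec_reannotate_sentences
  rw [reannotate_eq_regroup, reannotate_alt_eq_regroup]
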